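-- pv_equiv track=rewrite | github.com/alecsei0201/royalbot | app/ext/plugins/mega/fun_all.py | to_mock
-- ===== SOURCE A (Python) =====
-- def to_mock(s: str) -> str:
--     out, flip = [], True
--     for ch in s:
--         if ch.isalpha():
--             out.append(ch.upper() if flip else ch.lower())
--             flip = not flip
--         else:
--             out.append(ch)
--     return "".join(out)
-- ===== SOURCE B (Python) =====
-- def to_mock(s: str) -> str:
--     letters = [ch for ch in s if ch.isalpha()]
--     mocked = iter([c.upper() if i % 2 == 0 else c.lower() for i, c in enumerate(letters)])
--     return "".join(next(mocked) if ch.isalpha() else ch for ch in s)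
-- ===== Notes on version B (the rewrite author's own statement) =====
-- stated objective: alternative
-- what changed: Replaced the single stateful flip-toggle loop by a two-pass decomposition: first collect the alphabetic characters and mock each by the parity of its index, then reassemble by walking the original string and pulling mocked letters from an iterator.
import Mathlib
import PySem

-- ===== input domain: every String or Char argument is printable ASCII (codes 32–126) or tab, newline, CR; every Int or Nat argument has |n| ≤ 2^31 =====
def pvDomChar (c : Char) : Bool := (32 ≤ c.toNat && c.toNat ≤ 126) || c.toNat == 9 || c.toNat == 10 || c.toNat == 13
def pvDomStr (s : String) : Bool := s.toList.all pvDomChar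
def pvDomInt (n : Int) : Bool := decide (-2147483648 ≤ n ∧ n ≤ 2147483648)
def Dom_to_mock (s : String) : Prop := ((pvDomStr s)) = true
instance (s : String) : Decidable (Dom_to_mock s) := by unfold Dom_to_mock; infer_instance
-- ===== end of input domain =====

-- B re-decomposes A's stateful flip-toggle loop into two passes (mock the letters by index parity, then reassemble); equal return value on all inputs.

-- ===== PORT A =====
-- loop state: (out, flip); "".join at the end
def to_mock (s : String) : String :=
  String.mk
    (s.toList.foldl
      (fun (st : List Char × Bool) ch =>
        if PySem.Chars.isalpha ch then
          (st.1 ++ [if st.2 then PySem.Chars.upperChar ch else PySem.Chars.lowerChar ch], !st.2)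
        else
          (st.1 ++ [ch], st.2))
      ([], true)).1

-- ===== PORT B =====
-- mocked letters: upper if even index, lower if odd (Python: i % 2 == 0)
def to_mock_mocked (letters : List Char) : List Char :=
  (PySem.List.enumerate letters 0).map
    (fun p => if PySem.Int.mod p.1 2 == 0 then PySem.Chars.upperChar p.2 else PySem.Chars.lowerChar p.2)

-- reassemble: walk the original chars, pulling the next mocked letter for each alphabetic char
def to_mock_reassemble : List Char → List Char → List Char
  | [], _ => []
  | ch :: cs, m =>
    if PySem.Chars.isalpha ch then
      match m with
      | [] => []  -- iterator exhausted (never happens: one mocked letter per alphabetic char)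
      | x :: xs => x :: to_mock_reassemble cs xs
    else ch :: to_mock_reassemble cs m

def to_mock_alt (s : String) : String :=
  String.mk (to_mock_reassemble s.toList (to_mock_mocked (s.toList.filter PySem.Chars.isalpha)))

-- ===== PRECONDITION & SPEC =====
def Spec_to_mock (s : String) (out : String) : Prop := out = to_mock_alt s
instance (s : String) (out : String) : Decidable (Spec_to_mock s out) := by unfold Spec_to_mock; infer_instance

-- ===== CLAIM (what is proved, stated in full; the proofs are below) =====
def Claim_equal_to_mock : Prop := ∀ (s : String), Dom_to_mock s → Spec_to_mock s (to_mock s)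

-- ===== LEMMAS AND PROOFS =====

-- recursive characterisation of A's loop
def to_mock_rec : List Char → Bool → List Char
  | [], _ => []
  | ch :: cs, flip =>
    if PySem.Chars.isalpha ch then
      (if flip then PySem.Chars.upperChar ch else PySem.Chars.lowerChar ch) :: to_mock_rec cs (!flip)
    else ch :: to_mock_rec cs flip

lemma to_mock_foldl_eq (cs : List Char) (acc : List Char) (flip : Bool) :
    (cs.foldl
      (fun (st : List Char × Bool) ch =>
        if PySem.Chars.isalpha ch then
          (st.1 ++ [if st.2 then PySem.Chars.upperChar ch else PySem.Chars.lowerChar ch], !st.2)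
        else
          (st.1 ++ [ch], st.2))
      (acc, flip)).1 = acc ++ to_mock_rec cs flip := by
  induction cs generalizing acc flip with
  | nil => simp [to_mock_rec]
  | cons ch cs ih =>
    simp only [List.foldl_cons, to_mock_rec]
    by_cases h : PySem.Chars.isalpha ch <;> simp [h, ih]

lemma to_mock_mod2 (n : Int) : PySem.Int.mod n 2 = n % 2 :=
  PySem.Int.mod_eq_emod_of_pos (by norm_num)

-- main bridge: reassembling with the mocked letters enumerated from n equals A's loop with flip = (n % 2 == 0)
lemma to_mock_bridge (cs : List Char) (n : Int) (hn : 0 ≤ n) :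
    to_mock_reassemble cs
      ((PySem.List.enumerate (cs.filter PySem.Chars.isalpha) n).map
        (fun p => if PySem.Int.mod p.1 2 == 0 then PySem.Chars.upperChar p.2 else PySem.Chars.lowerChar p.2))
      = to_mock_rec cs (n % 2 == 0) := by
  induction cs generalizing n with
  | nil => simp [to_mock_reassemble, to_mock_rec]
  | cons ch cs ih =>
    by_cases h : PySem.Chars.isalpha ch
    · simp only [List.filter_cons, h, if_pos, PySem.List.enumerate_cons, List.map_cons,
        to_mock_reassemble, to_mock_rec]
      rw [ih (n + 1) (by omega), to_mock_mod2]
      have hflip : ((n + 1) % 2 == 0) = !(n % 2 == 0) := by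
        have h0 : n % 2 = 0 ∨ n % 2 = 1 := by omega
        have h1 : (n + 1) % 2 = 0 ∨ (n + 1) % 2 = 1 := by omega
        rcases h0 with h0 | h0 <;> rcases h1 with h1 | h1 <;> simp [h0, h1] <;> omega
      rw [hflip]
    · simp only [List.filter_cons, h, if_neg, Bool.false_eq_true, not_false_eq_true,
        to_mock_reassemble, to_mock_rec, ih n hn]

-- ===== VERDICT (by name: the statement is the Claim_ definition above) =====
theorem to_mock_spec : Claim_equal_to_mock := by
  intro s _
  unfold Spec_to_mock to_mock to_mock_alt to_mock_mocked
  rw [to_mock_foldl_eq, to_mock_bridge s.toList 0 le_rfl]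
  simp
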